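-- pv_equiv track=rewrite | github.com/den-vasyliev/kbot-deprecated | bin/usr/lib/python2.7/dist-packages/mercurial/match.py | _findsplitdirs
-- ===== SOURCE A (Python) =====
-- def _findsplitdirs(path):
--     # yields (dirname, basename) tuples, walking back to the root.  This is
--     # very similar to util.finddirs, except:
--     #  - produces a (dirname, basename) tuple, not just 'dirname'
--     #  - includes root dir
--     # Unlike manifest._splittopdir, this does not suffix `dirname` with a
--     # slash, and produces '.' for the root instead of ''.
--     oldpos = len(path)
--     pos = path.rfind('/')
--     while pos != -1:
--         yield path[:pos], path[pos + 1:oldpos]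
--         oldpos = pos
--         pos = path.rfind('/', 0, pos)
--     yield '.', path[:oldpos]
-- ===== SOURCE B (Python) =====
-- def _findsplitdirs(path):
--     # Split the path into its '/'-separated segments once, then rebuild the
--     # dirnames front-to-back by joining segments, and emit the collected
--     # (dirname, basename) pairs deepest-first by reversing at the end.
--     parts = path.split('/')
--     out = [('.', parts[0])]
--     prefix = parts[0]
--     for part in parts[1:]:
--         out.append((prefix, part))
--         prefix = prefix + '/' + part
--     for pair in reversed(out):
--         yield pair
-- ===== Notes on version B (the rewrite author's own statement) =====
-- stated objective: alternative
-- what changed: B replaces A's right-to-left rfind walk with slicing by a single split('/') into segments, a forward pass that rebuilds each dirname by joining segments into a growing prefix, and a final reversal of the collected pairs.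
import Mathlib
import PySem

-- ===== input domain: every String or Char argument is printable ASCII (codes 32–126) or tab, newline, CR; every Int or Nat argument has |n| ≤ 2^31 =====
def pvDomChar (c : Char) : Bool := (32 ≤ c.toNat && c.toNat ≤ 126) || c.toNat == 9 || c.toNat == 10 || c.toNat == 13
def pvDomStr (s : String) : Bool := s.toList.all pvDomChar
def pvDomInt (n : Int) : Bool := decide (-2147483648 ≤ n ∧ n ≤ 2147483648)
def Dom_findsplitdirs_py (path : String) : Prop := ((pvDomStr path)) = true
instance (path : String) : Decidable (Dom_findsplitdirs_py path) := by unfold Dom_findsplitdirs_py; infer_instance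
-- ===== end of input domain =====

-- B replaces A's right-to-left rfind walk with slicing by one split('/') into segments,
-- a forward pass rebuilding each dirname as a growing joined prefix, and a final reversal.

-- ===== PORT A =====
-- A's while-loop, with a fuel guard for totality only: each iteration consumes one
-- distinct slash position, so `path.toList.length + 1` fuel is never exhausted.
def findsplitdirsAGo (path : String) : Nat → Int → Int → List (String × String)
  | 0, _, _ => []
  | fuel + 1, oldpos, pos =>
    if pos ≠ -1 then
      (PySem.Str.slice path none (some pos), PySem.Str.slice path (some (pos + 1)) (some oldpos))
        :: findsplitdirsAGo path fuel pos (PySem.Str.rfindFrom path "/" 0 (some pos))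
    else [(".", PySem.Str.slice path none (some oldpos))]

def findsplitdirs_py (path : String) : List (String × String) :=
  findsplitdirsAGo path (path.toList.length + 1) (PySem.Str.len path) (PySem.Str.rfind path "/")

-- ===== PORT B =====
-- Source B's loop body: out.append((prefix, part)); prefix = prefix + '/' + part
def findsplitdirsBStep (st : List Char × List (String × String)) (part : List Char) :
    List Char × List (String × String) :=
  (st.1 ++ '/' :: part, st.2 ++ [(String.ofList st.1, String.ofList part)])

def findsplitdirs_py_alt (path : String) : List (String × String) :=
  match PySem.Chars.splitOn path.toList ['/'] with
  | [] => []   -- unreachable: str.split never returns an empty list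
  | p0 :: rest =>
    (rest.foldl findsplitdirsBStep (p0, [(".", String.ofList p0)])).2.reverse

-- ===== PRECONDITION & SPEC =====
def Spec_findsplitdirs_py (path : String) (out : List (String × String)) : Prop := out = findsplitdirs_py_alt path
instance (path : String) (out : List (String × String)) : Decidable (Spec_findsplitdirs_py path out) := by unfold Spec_findsplitdirs_py; infer_instance

-- ===== CLAIM (what is proved, stated in full; the proofs are below) =====
def Claim_equal_findsplitdirs_py : Prop := ∀ (path : String), Dom_findsplitdirs_py path → Spec_findsplitdirs_py path (findsplitdirs_py path)

-- ===== LEMMAS AND PROOFS =====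

-- positions of '/' below k, in increasing order
def slashIdx (s : List Char) (k : Nat) : List Nat :=
  (List.range k).filter (fun i => s[i]? == some '/')

-- the common shape both programs produce: walk the slash positions right-to-left
def walkS (s : List Char) : List Int → Int → List (String × String)
  | [], oldpos => [(".", String.ofList (PySem.List.slice s none (some oldpos)))]
  | pos :: rest, oldpos =>
    (String.ofList (PySem.List.slice s none (some pos)),
     String.ofList (PySem.List.slice s (some (pos + 1)) (some oldpos))) :: walkS s rest pos

def lastD (l : List Nat) : Int :=
  match l.reverse with
  | [] => -1
  | p :: _ => (p : Int)

theorem str_slice_ofList (s : String) (a b : Option Int) :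
    PySem.Str.slice s a b = String.ofList (PySem.List.slice s.toList a b) := rfl

theorem prefix_singleton (a : Char) (l : List Char) :
    List.isPrefixOf [a] l = (l.head? == some a) := by
  cases l <;> simp [List.isPrefixOf, eq_comm]

theorem lastD_append_single (l : List Nat) (p : Nat) : lastD (l ++ [p]) = (p : Int) := by
  simp [lastD]

theorem rfind_go_eq (s : List Char) (k : Nat) :
    PySem.Chars.rfind.go s ['/'] k = lastD (slashIdx s (k + 1)) := by
  induction k with
  | zero =>
    simp only [PySem.Chars.rfind.go, prefix_singleton, slashIdx]
    rw [show s.head? = s[0]? from List.head?_eq_getElem?]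
    by_cases h : (s[0]? == some '/') = true <;> simp [h, lastD]
  | succ k ih =>
    simp only [PySem.Chars.rfind.go, prefix_singleton, List.head?_drop, ih]
    unfold slashIdx
    rw [show List.range (k + 1 + 1) = List.range (k + 1) ++ [k + 1] from List.range_succ, List.filter_append]
    simp only [List.filter_cons, List.filter_nil]
    split
    · rw [lastD_append_single]
    · simp

theorem slashIdx_stable (s : List Char) (m k : Nat) (hm : s.length ≤ m) (hk : m ≤ k) :
    slashIdx s k = slashIdx s m := by
  unfold slashIdx
  rw [show k = m + (k - m) by omega, List.range_add, List.filter_append]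
  have : List.filter (fun i => s[i]? == some '/') (List.map (fun x => m + x) (List.range (k - m))) = [] := by
    rw [List.filter_eq_nil_iff]
    intro a ha
    simp only [List.mem_map] at ha
    obtain ⟨j, _, rfl⟩ := ha
    have : s[m + j]? = none := List.getElem?_eq_none (by omega)
    simp [this]
  simp [this]

theorem rfind_take (s : List Char) (k : Nat) (hk : k ≤ s.length) :
    PySem.Chars.rfind (s.take k) ['/'] = lastD (slashIdx s k) := by
  unfold PySem.Chars.rfind
  rw [rfind_go_eq]
  congr 1
  have h1 : slashIdx (s.take k) ((s.take k).length + 1) = slashIdx (s.take k) k := by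
    apply slashIdx_stable
    · simp
    · simp [List.length_take]; omega
  rw [h1]
  unfold slashIdx
  apply List.filter_congr
  intro i hi
  simp only [List.mem_range] at hi
  rw [List.getElem?_take]
  simp [hi]

theorem rfindFrom_eq_take (s : List Char) (p : Nat) (hp : p ≤ s.length) :
    PySem.Chars.rfindFrom s ['/'] 0 (some (p : Int)) = PySem.Chars.rfind (s.take p) ['/'] := by
  unfold PySem.Chars.rfindFrom
  have h1 : ¬ ((s.length : Int) < (p : Int)) := by exact_mod_cast not_lt.mpr (by exact_mod_cast hp)
  have h2 : ¬ ((p : Int) < 0) := by omega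
  simp only [h1, if_false, h2]
  by_cases h3 : PySem.Chars.rfind (List.take p s) ['/'] = -1 <;> simp [h3]

theorem slashIdx_pairwise (s : List Char) (k : Nat) :
    (slashIdx s k).Pairwise (· < ·) :=
  List.pairwise_lt_range.filter _

theorem slashIdx_split (s : List Char) (k : Nat) (L : List Nat) (p : Nat)
    (h : slashIdx s k = L ++ [p]) : slashIdx s p = L ∧ p < k := by
  have hpmem : p ∈ slashIdx s k := by rw [h]; simp
  have hpk : p < k := by
    have := List.mem_filter.mp hpmem
    exact List.mem_range.mp this.1
  have hpred : (s[p]? == some '/') = true := (List.mem_filter.mp hpmem).2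
  have hub : ∀ x ∈ slashIdx s k, x ≤ p := by
    intro x hx
    rw [h] at hx
    rcases List.mem_append.mp hx with hL | hp'
    · have hpw := slashIdx_pairwise s k
      rw [h] at hpw
      have := (List.pairwise_append.mp hpw).2.2
      exact le_of_lt (this x hL p (by simp))
    · simp at hp'; omega
  refine ⟨?_, hpk⟩
  have key : slashIdx s k = slashIdx s p ++ [p] := by
    unfold slashIdx
    rw [show k = p + (k - p) by omega, List.range_add, List.filter_append]
    congr 1
    have hkp : k - p = 1 + (k - p - 1) := by omega
    rw [hkp, List.range_add, List.map_append, List.filter_append]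
    have e1 : List.filter (fun i => s[i]? == some '/') (List.map (fun x => p + x) (List.range 1)) = [p] := by
      simp [List.range_one, hpred]
    have e2 : List.filter (fun i => s[i]? == some '/') (List.map (fun x => p + x) (List.map (fun x => 1 + x) (List.range (k - p - 1)))) = [] := by
      rw [List.filter_eq_nil_iff]
      intro a ha
      simp only [List.map_map, List.mem_map, Function.comp] at ha
      obtain ⟨j, hj, rfl⟩ := ha
      simp only [List.mem_range] at hj
      intro hpr
      have : p + (1 + j) ∈ slashIdx s k := by
        unfold slashIdx
        exact List.mem_filter.mpr ⟨List.mem_range.mpr (by omega), hpr⟩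
      have := hub _ this
      omega
    rw [e1, e2, List.append_nil]
  have := key.symm.trans h
  exact List.append_inj_left' this rfl

theorem main_loop (path : String) : ∀ (k : Nat), k ≤ path.toList.length →
    ∀ (oldpos : Int) (fuel : Nat), k + 1 ≤ fuel →
      findsplitdirsAGo path fuel oldpos (PySem.Chars.rfind (path.toList.take k) ['/'])
        = walkS path.toList ((slashIdx path.toList k).reverse.map (fun x : Nat => (x : Int))) oldpos := by
  intro k
  induction k using Nat.strong_induction_on with
  | _ k IH =>
    intro hk oldpos fuel hfuel
    obtain ⟨f, rfl⟩ : ∃ f, fuel = f + 1 := ⟨fuel - 1, by omega⟩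
    rw [rfind_take _ _ hk]
    rcases hrev : (slashIdx path.toList k).reverse with _ | ⟨p, rest⟩
    · simp [lastD, hrev, findsplitdirsAGo, walkS, str_slice_ofList]
    · have hsplit : slashIdx path.toList k = rest.reverse ++ [p] := by
        have := congrArg List.reverse hrev
        simpa using this
      obtain ⟨hP, hpk⟩ := slashIdx_split _ _ _ _ hsplit
      have hlast : lastD (slashIdx path.toList k) = (p : Int) := by
        simp [lastD, hrev]
      rw [hlast]
      show findsplitdirsAGo path (f + 1) oldpos (p : Int) = _
      rw [findsplitdirsAGo]
      rw [if_pos (by simp)]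
      have hbr : PySem.Str.rfindFrom path "/" 0 (some (p : Int))
          = PySem.Chars.rfind (path.toList.take p) ['/'] := by
        rw [PySem.Str.rfindFrom_eq]
        exact rfindFrom_eq_take _ _ (by omega)
      rw [hbr]
      rw [IH p hpk (by omega) (p : Int) f (by omega)]
      have hrest : rest = (slashIdx path.toList p).reverse := by
        rw [hP, List.reverse_reverse]
      rw [List.map_cons, walkS, hrest]
      rw [str_slice_ofList, str_slice_ofList]

-- ---- B side: characterising split('/') ----

theorem go_noslash (l : List Char) : ∀ (fuel : Nat) (cur : List Char) (acc : List (List Char)),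
    '/' ∉ l → PySem.Chars.splitOn.go ['/'] fuel l cur acc = ((cur.reverse ++ l) :: acc).reverse := by
  induction l with
  | nil => intro fuel cur acc _; cases fuel <;> simp [PySem.Chars.splitOn.go]
  | cons c rest ih =>
    intro fuel cur acc h
    cases fuel with
    | zero => simp [PySem.Chars.splitOn.go]
    | succ f =>
      have hc : c ≠ '/' := by intro hc; exact h (by simp [hc])
      rw [PySem.Chars.splitOn.go]
      rw [if_neg (by simp [prefix_singleton, hc])]
      rw [ih f (c :: cur) acc (by intro hm; exact h (by simp [hm]))]
      simp

theorem go_acc : ∀ (fuel : Nat) (l cur : List Char) (acc : List (List Char)),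
    PySem.Chars.splitOn.go ['/'] fuel l cur acc
      = acc.reverse ++ PySem.Chars.splitOn.go ['/'] fuel l cur [] := by
  intro fuel
  induction fuel with
  | zero => intro l cur acc; simp [PySem.Chars.splitOn.go]
  | succ f ih =>
    intro l cur acc
    cases l with
    | nil => simp [PySem.Chars.splitOn.go]
    | cons c rest =>
      rw [PySem.Chars.splitOn.go, PySem.Chars.splitOn.go]
      by_cases hp : List.isPrefixOf ['/'] (c :: rest) = true
      · rw [if_pos hp, if_pos hp, ih, ih (List.drop ['/'].length (c :: rest)) [] [cur.reverse]]
        simp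
      · rw [if_neg hp, if_neg hp, ih]

theorem go_through (b : List Char) : ∀ (a : List Char) (fuel : Nat) (cur : List Char) (acc : List (List Char)),
    '/' ∉ a → (a ++ '/' :: b).length ≤ fuel →
    PySem.Chars.splitOn.go ['/'] fuel (a ++ '/' :: b) cur acc
      = PySem.Chars.splitOn.go ['/'] (fuel - (a.length + 1)) b [] ((cur.reverse ++ a) :: acc) := by
  intro a
  induction a with
  | nil =>
    intro fuel cur acc _ hf
    simp only [List.length, List.nil_append] at hf ⊢
    obtain ⟨f, rfl⟩ : ∃ f, fuel = f + 1 := ⟨fuel - 1, by omega⟩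
    rw [PySem.Chars.splitOn.go]
    rw [if_pos (by simp)]
    simp
  | cons c a' ih =>
    intro fuel cur acc ha hf
    have hc : c ≠ '/' := by intro hc; exact ha (by simp [hc])
    obtain ⟨f, rfl⟩ : ∃ f, fuel = f + 1 := ⟨fuel - 1, by simp at hf; omega⟩
    rw [List.cons_append, PySem.Chars.splitOn.go]
    rw [if_neg (by simp [prefix_singleton, hc])]
    rw [ih f (c :: cur) acc (by intro hm; exact ha (by simp [hm])) (by simp at hf ⊢; omega)]
    simp only [List.reverse_cons, List.length_cons]
    rw [show f + 1 - (a'.length + 1 + 1) = f - (a'.length + 1) by omega]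
    simp

theorem splitOn_noslash (s : List Char) (h : '/' ∉ s) :
    PySem.Chars.splitOn s ['/'] = [s] := by
  unfold PySem.Chars.splitOn
  rw [go_noslash s (s.length + 1) [] [] h]
  simp

theorem splitOn_first (a b : List Char) (ha : '/' ∉ a) :
    PySem.Chars.splitOn (a ++ '/' :: b) ['/'] = a :: PySem.Chars.splitOn b ['/'] := by
  unfold PySem.Chars.splitOn
  rw [go_through b a ((a ++ '/' :: b).length + 1) [] [] ha (by omega)]
  have hlen : (a ++ '/' :: b).length + 1 - (a.length + 1) = b.length + 1 := by
    simp
  rw [hlen, go_acc]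
  simp

theorem mem_split_first (x : Char) : ∀ (l : List Char), x ∈ l → ∃ a c, l = a ++ x :: c ∧ x ∉ a := by
  intro l
  induction l with
  | nil => intro h; simp at h
  | cons y l' ih =>
    intro h
    by_cases hy : y = x
    · exact ⟨[], l', by simp [hy], by simp⟩
    · obtain ⟨a, c, hEq, hn⟩ := ih (by rcases List.mem_cons.mp h with h' | h'; exact absurd h'.symm hy; exact h')
      exact ⟨y :: a, c, by simp [hEq], by simp [hn]; exact fun he => hy he.symm⟩

theorem mem_split_last (x : Char) (l : List Char) (h : x ∈ l) :
    ∃ t b, l = t ++ x :: b ∧ x ∉ b := by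
  obtain ⟨a, c, hEq, hn⟩ := mem_split_first x l.reverse (by simpa using h)
  refine ⟨c.reverse, a.reverse, ?_, by simpa using hn⟩
  have := congrArg List.reverse hEq
  simpa using this

theorem splitOn_last (t b : List Char) (hb : '/' ∉ b) :
    PySem.Chars.splitOn (t ++ '/' :: b) ['/'] = PySem.Chars.splitOn t ['/'] ++ [b] := by
  have H : ∀ (n : Nat) (t : List Char), t.length ≤ n →
      PySem.Chars.splitOn (t ++ '/' :: b) ['/'] = PySem.Chars.splitOn t ['/'] ++ [b] := by
    intro n
    induction n with
    | zero =>
      intro t ht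
      have : t = [] := List.eq_nil_of_length_eq_zero (by omega)
      subst this
      rw [splitOn_first [] b (by simp), splitOn_noslash b hb, splitOn_noslash [] (by simp)]
      simp
    | succ n ih =>
      intro t ht
      by_cases hmem : '/' ∈ t
      · obtain ⟨a, c, hEq, hna⟩ := mem_split_first '/' t hmem
        subst hEq
        rw [List.append_assoc, List.cons_append]
        rw [splitOn_first a (c ++ '/' :: b) hna]
        rw [ih c (by simp at ht; omega)]
        rw [splitOn_first a c hna]
        simp
      · rw [splitOn_first t b hmem, splitOn_noslash b hb, splitOn_noslash t hmem]
        simp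
  exact H t.length t le_rfl

theorem slashIdx_nil (s : List Char) (h : '/' ∉ s) : slashIdx s s.length = [] := by
  unfold slashIdx
  rw [List.filter_eq_nil_iff]
  intro i hi
  simp only [List.mem_range] at hi
  rw [List.getElem?_eq_getElem hi]
  simp only [Option.some_beq_some, beq_iff_eq]
  intro he
  exact h (he ▸ List.getElem_mem hi)

theorem slashIdx_append (t b : List Char) (hb : '/' ∉ b) :
    slashIdx (t ++ '/' :: b) (t ++ '/' :: b).length = slashIdx t t.length ++ [t.length] := by
  unfold slashIdx
  have hlen : (t ++ '/' :: b).length = t.length + (1 + b.length) := by simp; omega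
  rw [hlen, List.range_add, List.filter_append]
  congr 1
  · apply List.filter_congr
    intro i hi
    simp only [List.mem_range] at hi
    rw [List.getElem?_append_left hi]
  · rw [show 1 + b.length = 1 + b.length from rfl, List.range_add, List.map_append]
    rw [List.filter_append]
    have e1 : List.filter (fun i => (t ++ '/' :: b)[i]? == some '/') (List.map (fun x => t.length + x) (List.range 1)) = [t.length] := by
      have : (t ++ '/' :: b)[t.length]? = some '/' := by
        rw [List.getElem?_append_right le_rfl]
        simp
      simp [List.range_one]
    have e2 : List.filter (fun i => (t ++ '/' :: b)[i]? == some '/') (List.map (fun x => t.length + x) (List.map (fun x => 1 + x) (List.range b.length))) = [] := by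
      rw [List.filter_eq_nil_iff]
      intro i hi
      simp only [List.map_map, List.mem_map, Function.comp] at hi
      obtain ⟨j, hj, rfl⟩ := hi
      simp only [List.mem_range] at hj
      have : (t ++ '/' :: b)[t.length + (1 + j)]? = some b[j] := by
        rw [List.getElem?_append_right (by omega)]
        rw [show t.length + (1 + j) - t.length = 1 + j from by omega]
        rw [show (1 + j) = j + 1 from by omega]
        simp [List.getElem?_eq_getElem hj]
      simp only [this, Option.some_beq_some, beq_iff_eq]
      intro he
      exact hb (he ▸ List.getElem_mem hj)
    rw [e1, e2, List.append_nil]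

theorem walk_take (t u : List Char) : ∀ (M : List Nat) (k : Nat),
    (∀ x ∈ M, x ≤ t.length) → k ≤ t.length →
    walkS (t ++ u) (M.map (fun x : Nat => (x : Int))) (k : Int)
      = walkS t (M.map (fun x : Nat => (x : Int))) (k : Int) := by
  intro M
  induction M with
  | nil =>
    intro k _ hk
    simp only [List.map_nil, walkS]
    rw [PySem.List.slice_to _ (by positivity), PySem.List.slice_to _ (by positivity)]
    rw [Int.toNat_natCast, List.take_append_of_le_length hk]
  | cons p M' ih =>
    intro k hM hk
    have hp : p ≤ t.length := hM p (by simp)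
    simp only [List.map_cons, walkS]
    rw [PySem.List.slice_to _ (by positivity), PySem.List.slice_to _ (by positivity)]
    rw [Int.toNat_natCast, List.take_append_of_le_length hp]
    rw [show ((p : Int) + 1) = ((p + 1 : Nat) : Int) from by push_cast; ring]
    rw [PySem.List.slice_natCast, PySem.List.slice_natCast]
    have hseg : List.take (k - (p + 1)) (List.drop (p + 1) (t ++ u))
        = List.take (k - (p + 1)) (List.drop (p + 1) t) := by
      by_cases hp1 : p + 1 ≤ t.length
      · rw [List.drop_append_of_le_length hp1]
        rw [List.take_append_of_le_length (by simp [List.length_drop]; omega)]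
      · have hk0 : k - (p + 1) = 0 := by omega
        simp [hk0]
    rw [hseg, ih p (fun x hx => hM x (by simp [hx])) hp]

theorem bmain : ∀ (n : Nat) (s : List Char), s.length ≤ n →
    ∃ p0 rest, PySem.Chars.splitOn s ['/'] = p0 :: rest ∧
      (rest.foldl findsplitdirsBStep (p0, [(".", String.ofList p0)])).1 = s ∧
      (rest.foldl findsplitdirsBStep (p0, [(".", String.ofList p0)])).2.reverse
        = walkS s ((slashIdx s s.length).reverse.map (fun x : Nat => (x : Int))) (s.length : Int) := by
  intro n
  induction n with
  | zero =>
    intro s hs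
    have : s = [] := List.eq_nil_of_length_eq_zero (by omega)
    subst this
    refine ⟨[], [], splitOn_noslash [] (by simp), by simp, ?_⟩
    rw [slashIdx_nil [] (by simp)]
    simp [walkS, PySem.List.slice]
  | succ n ih =>
    intro s hs
    by_cases hmem : '/' ∈ s
    · obtain ⟨t, b, hEq, hnb⟩ := mem_split_last '/' s hmem
      subst hEq
      obtain ⟨p0, rest', hsplit, h1, h2⟩ := ih t (by simp at hs; omega)
      refine ⟨p0, rest' ++ [b], by rw [splitOn_last t b hnb, hsplit]; rfl, ?_, ?_⟩
      · rw [List.foldl_append]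
        simp only [List.foldl_cons, List.foldl_nil, findsplitdirsBStep]
        rw [h1]
      · rw [List.foldl_append]
        simp only [List.foldl_cons, List.foldl_nil, findsplitdirsBStep]
        rw [List.reverse_append, h1, h2]
        rw [slashIdx_append t b hnb]
        rw [List.reverse_append]
        simp only [List.reverse_cons, List.reverse_nil, List.nil_append, List.singleton_append,
          List.map_cons, walkS]
        have hsl1 : PySem.List.slice (t ++ '/' :: b) none (some ((t.length : Nat) : Int)) = t := by
          rw [PySem.List.slice_to _ (by positivity), Int.toNat_natCast, List.take_left]
        have hsl2 : PySem.List.slice (t ++ '/' :: b) (some ((t.length : Int) + 1)) (some ((t ++ '/' :: b).length : Int)) = b := by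
          rw [show ((t.length : Int) + 1) = ((t.length + 1 : Nat) : Int) from by push_cast; ring]
          rw [PySem.List.slice_natCast]
          have hdrop : (t ++ '/' :: b).drop (t.length + 1) = b := by
            rw [show t.length + 1 = (t ++ ['/']).length from by simp]
            rw [show t ++ '/' :: b = (t ++ ['/']) ++ b from by simp]
            rw [List.drop_left]
          rw [hdrop]
          have : (t ++ '/' :: b).length - (t.length + 1) = b.length := by simp; omega
          rw [this, List.take_length]
        rw [hsl1, hsl2]
        have hwt : walkS (t ++ '/' :: b) (((slashIdx t t.length).reverse).map (fun x : Nat => (x : Int))) ((t.length : Nat) : Int)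
            = walkS t (((slashIdx t t.length).reverse).map (fun x : Nat => (x : Int))) ((t.length : Nat) : Int) := by
          apply walk_take
          · intro x hx
            simp only [List.mem_reverse] at hx
            have := List.mem_filter.mp hx
            have := List.mem_range.mp this.1
            omega
          · exact le_rfl
        rw [hwt]
    · refine ⟨s, [], splitOn_noslash s hmem, by simp, ?_⟩
      rw [slashIdx_nil s hmem]
      simp only [List.reverse_nil, List.map_nil, walkS, List.foldl_nil, List.reverse_cons,
        List.reverse_nil, List.nil_append]
      rw [PySem.List.slice_to _ (by positivity), Int.toNat_natCast, List.take_length]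

-- ===== VERDICT (by name: the statement is the Claim_ definition above) =====
theorem findsplitdirs_py_spec : Claim_equal_findsplitdirs_py := by
  intro path _
  unfold Spec_findsplitdirs_py findsplitdirs_py findsplitdirs_py_alt
  have h1 : PySem.Str.rfind path "/" = PySem.Chars.rfind (path.toList.take path.toList.length) ['/'] := by
    rw [List.take_length]
    simp [PySem.Str.rfind_eq]
  have h2 : PySem.Str.len path = (path.toList.length : Int) := by
    simp [PySem.Str.len_eq]
  rw [h1, h2, main_loop path path.toList.length le_rfl _ _ le_rfl]
  obtain ⟨p0, rest, hsplit, _, hout⟩ := bmain path.toList.length path.toList le_rfl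
  rw [hsplit]
  exact hout.symm
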